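-- pv_equiv track=rewrite | github.com/rsherer/dressing-for-the-weather | src/scrape_weather.py | get_low_temperature
-- ===== SOURCE A (Python) =====
-- def get_low_temperature(string):
--     '''
--     Take the hi/lo string from weather.com and convert to an integer of the
--     low temperature.
--
--     Input: string
--
--     Output: int
--     '''
--
--     numbers = [str(num) for num in range(0,10)]
--     temp = ''
--     for char in reversed(string[:-1]):
--         if char in numbers:
--             temp = char + temp
--         elif char == '-':
--             raise ValueError('Negative temperatures - too cold!')
--         else:
--             break
--     return int(temp)
-- ===== SOURCE B (Python) =====
-- def get_low_temperature(string):
--     '''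
--     Take the hi/lo string from weather.com and convert to an integer of the
--     low temperature.
--
--     Input: string
--
--     Output: int
--     '''
--     s = string[:-1]
--     head = s.rstrip('0123456789')
--     if head.endswith('-'):
--         raise ValueError('Negative temperatures - too cold!')
--     return int(s[len(head):])
-- ===== Notes on version B (the rewrite author's own statement) =====
-- stated objective: simpler
-- what changed: Replaces the explicit per-character backward loop with an extract-then-validate decomposition: rstrip the trailing digit run off string[:-1], check whether the remaining head ends in '-', and convert the run with int().
import Mathlib
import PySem

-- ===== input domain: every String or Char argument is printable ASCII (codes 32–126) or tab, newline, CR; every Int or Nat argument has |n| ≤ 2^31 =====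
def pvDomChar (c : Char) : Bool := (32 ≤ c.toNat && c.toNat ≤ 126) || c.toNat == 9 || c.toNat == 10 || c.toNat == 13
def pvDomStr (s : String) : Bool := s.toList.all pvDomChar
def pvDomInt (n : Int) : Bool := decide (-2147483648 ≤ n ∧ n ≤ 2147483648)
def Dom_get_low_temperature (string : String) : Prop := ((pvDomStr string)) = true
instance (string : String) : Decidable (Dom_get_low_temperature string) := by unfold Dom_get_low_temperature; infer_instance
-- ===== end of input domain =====

-- B replaces A's explicit backward character loop by an extract-then-validate decomposition
-- (rstrip the trailing digit run, check the boundary character, int() the run); objective: simpler.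


-- ===== PORT A =====
-- numbers = [str(num) for num in range(0,10)]  (a list of the ten digit characters)
def pvNumbers : List Char := ['0', '1', '2', '3', '4', '5', '6', '7', '8', '9']

-- the 'for char in reversed(string[:-1])' loop with its accumulator temp;
-- none = the ValueError raise on '-' (excluded by Pre_), some temp = normal exit/break
def pvALoop : List Char → List Char → Option (List Char)
  | [], temp => some temp
  | c :: rest, temp =>
    if c ∈ pvNumbers then pvALoop rest (c :: temp)
    else if c = '-' then none
    else some temp

def get_low_temperature (string : String) : Int :=
  -- reversed(string[:-1]) ; string[:-1] is dropLast (PySem.Str.slice_to_neg_one)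
  match pvALoop string.toList.dropLast.reverse [] with
  | some temp => (PySem.Int.ofChars? temp).getD 0   -- int(temp); none (int('') ValueError) excluded by Pre_
  | none => 0                                       -- ValueError raise, excluded by Pre_

-- ===== PORT B =====
def pvDigits : List Char := "0123456789".toList

def get_low_temperature_alt (string : String) : Int :=
  let s := string.toList.dropLast                                -- s = string[:-1]
  let head := (s.reverse.dropWhile (· ∈ pvDigits)).reverse       -- s.rstrip('0123456789'), exact by hand
  if PySem.Chars.endswith head ['-'] then 0                      -- ValueError raise, excluded by Pre_
  else (PySem.Int.ofChars? (s.drop head.length)).getD 0          -- int(s[len(head):]); none excluded by Pre_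

-- ===== PRECONDITION & SPEC =====
-- Pre_ excludes exactly the inputs on which the Python A raises ValueError: those where
-- string[:-1] has no trailing digit run (int('') raises) and those where the character just
-- before the trailing digit run is '-' (the explicit 'too cold' raise).
def Pre_get_low_temperature (string : String) : Prop :=
  let r := string.toList.dropLast.reverse
  r.takeWhile (fun c => c ∈ pvDigits) ≠ [] ∧
  r[(r.takeWhile (fun c => c ∈ pvDigits)).length]? ≠ some '-'
instance (string : String) : Decidable (Pre_get_low_temperature string) := by
  unfold Pre_get_low_temperature; infer_instance

def pvWitness_get_low_temperature : String := "24/18F"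

def Spec_get_low_temperature (string : String) (out : Int) : Prop := out = get_low_temperature_alt string
instance (string : String) (out : Int) : Decidable (Spec_get_low_temperature string out) := by unfold Spec_get_low_temperature; infer_instance

-- ===== CLAIM (what is proved, stated in full; the proofs are below) =====
def Claim_equal_get_low_temperature : Prop := ∀ (string : String), Dom_get_low_temperature string → Pre_get_low_temperature string → Spec_get_low_temperature string (get_low_temperature string)

-- ===== LEMMAS AND PROOFS =====

theorem getElem?_takeWhile_length {α : Type} (p : α → Bool) (l : List α) :
    l[(l.takeWhile p).length]? = (l.dropWhile p).head? := by
  induction l with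
  | nil => rfl
  | cons c rest ih =>
    by_cases hc : p c = true
    · rw [List.takeWhile_cons_of_pos hc, List.dropWhile_cons_of_pos hc]
      simpa using ih
    · rw [List.takeWhile_cons_of_neg (by simpa using hc),
          List.dropWhile_cons_of_neg (by simpa using hc)]
      rfl

theorem pvALoop_eq (r acc : List Char)
    (h : (r.dropWhile (· ∈ pvNumbers)).head? ≠ some '-') :
    pvALoop r acc = some ((r.takeWhile (· ∈ pvNumbers)).reverse ++ acc) := by
  induction r generalizing acc with
  | nil => simp [pvALoop]
  | cons c rest ih =>
    by_cases hc : c ∈ pvNumbers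
    · simp only [pvALoop, if_pos hc]
      rw [ih _ (by simpa [List.dropWhile_cons_of_pos, hc] using h)]
      rw [show List.takeWhile (fun x => decide (x ∈ pvNumbers)) (c :: rest)
            = c :: List.takeWhile (fun x => decide (x ∈ pvNumbers)) rest
          from List.takeWhile_cons_of_pos (by simp [hc])]
      simp
    · have hne : c ≠ '-' := by
        intro hceq
        subst hceq
        exact h (by rw [List.dropWhile_cons_of_neg (by decide)]; rfl)
      rw [show List.takeWhile (fun x => decide (x ∈ pvNumbers)) (c :: rest) = []
          from List.takeWhile_cons_of_neg (by simp [hc])]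
      simp [pvALoop, hc, hne]

theorem pvDigits_eq : pvDigits = pvNumbers := by decide

-- ===== VERDICT (by name: the statement is the Claim_ definition above) =====
theorem get_low_temperature_spec : Claim_equal_get_low_temperature := by
  intro string _ hpre
  unfold Spec_get_low_temperature get_low_temperature get_low_temperature_alt
  obtain ⟨-, h2⟩ := hpre
  set r := string.toList.dropLast.reverse with hr
  have hsplit := List.takeWhile_append_dropWhile (p := fun c => decide (c ∈ pvNumbers)) (l := r)
  -- the character before the trailing digit run is the head of the dropWhile part
  have hhead : (r.dropWhile (· ∈ pvNumbers)).head? ≠ some '-' := by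
    intro hcontra
    apply h2
    rw [pvDigits_eq, getElem?_takeWhile_length]
    exact hcontra
  rw [pvALoop_eq _ _ hhead]
  -- B's raise branch is not taken: head does not end with '-'
  have hends : PySem.Chars.endswith ((r.dropWhile (· ∈ pvNumbers)).reverse) ['-'] = false := by
    by_contra hcb
    have htrue : PySem.Chars.endswith ((r.dropWhile (· ∈ pvNumbers)).reverse) ['-'] = true := by
      cases hcb' : PySem.Chars.endswith ((r.dropWhile (· ∈ pvNumbers)).reverse) ['-'] with
      | true => rfl
      | false => exact absurd hcb' hcb
    rw [PySem.Chars.endswith_iff] at htrue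
    obtain ⟨pre, hpreeq⟩ := htrue
    apply hhead
    have h3 : List.dropWhile (fun c => decide (c ∈ pvNumbers)) r = '-' :: pre.reverse := by
      have := congrArg List.reverse hpreeq
      simpa using this.symm
    simp [h3]
  have hstr : string.toList.dropLast = r.reverse := by rw [hr, List.reverse_reverse]
  simp only [hstr, pvDigits_eq, List.reverse_reverse]
  -- s.drop head.length = (takeWhile).reverse
  have hrrev : r.reverse = (List.dropWhile (fun c => decide (c ∈ pvNumbers)) r).reverse
      ++ (List.takeWhile (fun c => decide (c ∈ pvNumbers)) r).reverse := by
    conv_lhs => rw [← hsplit]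
    simp
  rw [hrrev, List.drop_left]
  simp [hends]
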